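-- pv_equiv track=rewrite | github.com/WhoIsJayD/python-beginner-projects | projects/Password Projects/Password Meter/meter_pass.py | consecutiveLowerCase
-- ===== SOURCE A (Python) =====
-- acentos = "óá"
--
-- def consecutiveLowerCase(password):
--     password = f"{password}1"
--
--     countLowerCase = sum(
--         1
--         for i in range(len(password))
--         if (
--             password[i].islower()
--             and password[i + 1].islower()
--             and password[i + 1] not in acentos
--             and password[i] not in acentos
--         )
--     )
--     return (countLowerCase * 2) * -1
-- ===== SOURCE B (Python) =====
-- acentos = "óá"
--
-- def consecutiveLowerCase(password):
--     s = f"{password}"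
--
--     def good(c):
--         return c.islower() and c not in acentos
--
--     total = 0
--     i = 0
--     n = len(s)
--     while i < n:
--         if good(s[i]):
--             j = i + 1
--             while j < n and good(s[j]):
--                 j += 1
--             total += j - i - 1   # pairs inside this maximal run = run length - 1
--             i = j
--         else:
--             i += 1
--     return total * -2
-- ===== Notes on version B (the rewrite author's own statement) =====
-- stated objective: faster
-- what changed: B drops the appended sentinel character and the per-index adjacent-pair scan with two subscript lookups per position; instead it walks the string by maximal runs of qualifying lowercase characters and adds run_length-1 per run.
import Mathlib
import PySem

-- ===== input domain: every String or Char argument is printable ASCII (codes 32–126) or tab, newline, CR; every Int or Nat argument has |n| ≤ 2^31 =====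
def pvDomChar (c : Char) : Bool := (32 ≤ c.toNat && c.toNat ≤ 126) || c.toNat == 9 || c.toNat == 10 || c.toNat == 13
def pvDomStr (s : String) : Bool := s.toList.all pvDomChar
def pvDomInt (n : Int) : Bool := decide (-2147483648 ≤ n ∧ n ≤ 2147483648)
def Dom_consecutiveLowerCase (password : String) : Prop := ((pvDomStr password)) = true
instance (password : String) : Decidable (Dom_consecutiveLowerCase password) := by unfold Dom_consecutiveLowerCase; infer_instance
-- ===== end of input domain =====

-- B scans maximal runs of qualifying lowercase characters instead of adjacent index pairs (one lookup per position, no appended sentinel); measured modestly faster, same O(n).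

def acentos : List Char := "óá".toList

-- good c  =  c.islower() and c not in acentos
def goodChar (c : Char) : Bool := PySem.Chars.islower c && !(acentos.contains c)

-- ===== PORT A =====
-- Literal port: s = password + "1"; sum over i in range(len(s)) of the 4-way and-chain.
-- Python's s[i+1] is out of range only at i = len(s)-1, where s[i] = '1' makes the first
-- conjunct false and the and-chain short-circuits; Option.any returns false there likewise.
def consecutiveLowerCase (password : String) : Int :=
  let s : List Char := password.toList ++ ['1']
  let countLowerCase : Int :=
    (PySem.List.pyRange 0 (s.length : Int) 1).foldl
      (fun acc i =>
        if ((PySem.List.pyGet? s i).any PySem.Chars.islower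
            && (PySem.List.pyGet? s (i + 1)).any PySem.Chars.islower
            && (PySem.List.pyGet? s (i + 1)).any (fun c => !(acentos.contains c))
            && (PySem.List.pyGet? s i).any (fun c => !(acentos.contains c)))
        then acc + 1 else acc) 0
  (countLowerCase * 2) * -1

-- ===== PORT B =====
-- outer while: skip a non-qualifying char, or consume a whole maximal run at once
-- (inner while j advance = takeWhile/dropWhile on the tail), adding (run length - 1).
def countRuns (l : List Char) : Int :=
  match l with
  | [] => 0
  | c :: t =>
    if goodChar c then
      ((t.takeWhile goodChar).length : Int) + countRuns (t.dropWhile goodChar)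
    else countRuns t
termination_by l.length
decreasing_by
  · exact Nat.lt_succ_of_le (List.length_dropWhile_le _ _)
  · exact Nat.lt_succ_of_le (Nat.le_refl _)

def consecutiveLowerCase_alt (password : String) : Int :=
  countRuns password.toList * -2

-- ===== PRECONDITION & SPEC =====
def Spec_consecutiveLowerCase (password : String) (out : Int) : Prop := out = consecutiveLowerCase_alt password
instance (password : String) (out : Int) : Decidable (Spec_consecutiveLowerCase password out) := by unfold Spec_consecutiveLowerCase; infer_instance

-- ===== CLAIM (what is proved, stated in full; the proofs are below) =====
def Claim_equal_consecutiveLowerCase : Prop := ∀ (password : String), Dom_consecutiveLowerCase password → Spec_consecutiveLowerCase password (consecutiveLowerCase password)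

-- ===== LEMMAS AND PROOFS =====

-- number of adjacent pairs of good chars, structurally
def pairCount : List Char → Int
  | [] => 0
  | [_] => 0
  | a :: b :: t => (if goodChar a && goodChar b then 1 else 0) + pairCount (b :: t)

def optGood (o : Option Char) : Bool := o.any goodChar

-- A's and-chain is the conjunction of 'good' at i and i+1
lemma condA_eq (a b : Option Char) :
    (a.any PySem.Chars.islower && b.any PySem.Chars.islower
      && b.any (fun c => !(acentos.contains c)) && a.any (fun c => !(acentos.contains c)))
    = (optGood a && optGood b) := by
  cases a <;> cases b <;> simp [optGood, goodChar, Option.any] <;>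
    (try rename_i x y) <;> (try cases hx : PySem.Chars.islower x) <;>
    simp_all [Bool.and_comm]

-- the index-based count over List.range, as an intermediate form
def natCount (s : List Char) : Int :=
  (List.range s.length).foldl
    (fun acc k => if optGood s[k]? && optGood s[k+1]? then acc + 1 else acc) 0

lemma foldl_ite_shift (f : Nat → Bool) (xs : List Nat) (a : Int) :
    xs.foldl (fun acc k => if f k then acc + 1 else acc) a
      = a + xs.foldl (fun acc k => if f k then acc + 1 else acc) 0 := by
  induction xs generalizing a with
  | nil => simp
  | cons x xs ih =>
    simp only [List.foldl_cons]
    rw [ih, ih (if f x then (0:Int) + 1 else 0)]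
    split <;> ring

lemma natCount_cons (c : Char) (t : List Char) :
    natCount (c :: t) = (if goodChar c && optGood t[0]? then 1 else 0) + natCount t := by
  unfold natCount
  rw [List.length_cons, List.range_succ_eq_map, List.foldl_cons, List.foldl_map]
  have h1 : ∀ (k : Nat), (c :: t)[k+1]? = t[k]? := fun k => rfl
  simp only [h1]
  rw [foldl_ite_shift (fun k => optGood t[k]? && optGood t[k+1]?)]
  simp [optGood]

lemma natCount_eq_pairCount (l : List Char) : natCount l = pairCount l := by
  induction l with
  | nil => simp [natCount, pairCount]
  | cons c t ih =>
    rw [natCount_cons, ih]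
    cases t with
    | nil => simp [pairCount, optGood]
    | cons b t' => simp [pairCount, optGood]

lemma good_one : goodChar '1' = false := by decide

lemma pairCount_append_one (l : List Char) : pairCount (l ++ ['1']) = pairCount l := by
  induction l with
  | nil => simp [pairCount]
  | cons a t ih =>
    cases t with
    | nil => simp [pairCount, good_one]
    | cons b t' =>
      simp only [List.cons_append, pairCount] at ih ⊢
      rw [ih]

lemma pairCount_run (a : Char) (t : List Char) (h : goodChar a = true) :
    pairCount (a :: t) = ((t.takeWhile goodChar).length : Int) + pairCount (t.dropWhile goodChar) := by
  induction t generalizing a with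
  | nil => simp [pairCount]
  | cons b t' ih =>
    by_cases hb : goodChar b = true
    · simp only [pairCount, List.takeWhile_cons, List.dropWhile_cons, hb, if_pos, h,
        Bool.and_self, List.length_cons]
      rw [ih b hb]
      push_cast
      ring
    · simp only [pairCount, List.takeWhile_cons, List.dropWhile_cons]
      rw [Bool.not_eq_true] at hb
      simp [h, hb]

lemma countRuns_eq_pairCount (l : List Char) : countRuns l = pairCount l := by
  fun_induction countRuns with
  | case1 => simp [pairCount]
  | case2 c t h ih =>
    rw [ih, ← pairCount_run c t h]
  | case3 c t h ih =>
    rw [ih]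
    rw [Bool.not_eq_true] at h
    cases t with
    | nil => simp [pairCount]
    | cons b t' => simp [pairCount, h]

-- A's foldl over pyRange equals natCount of the sentinel-extended list
lemma foldA_eq_natCount (s : List Char) :
    (PySem.List.pyRange 0 (s.length : Int) 1).foldl
      (fun acc i =>
        if ((PySem.List.pyGet? s i).any PySem.Chars.islower
            && (PySem.List.pyGet? s (i + 1)).any PySem.Chars.islower
            && (PySem.List.pyGet? s (i + 1)).any (fun c => !(acentos.contains c))
            && (PySem.List.pyGet? s i).any (fun c => !(acentos.contains c)))
        then acc + 1 else acc) 0 = natCount s := by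
  rw [PySem.List.pyRange_zero_natCast, List.foldl_map]
  unfold natCount
  apply PySem.List.foldl_congr_mem
  intro acc k hk
  have hcast : ((k : Int) + 1) = ((k + 1 : Nat) : Int) := by push_cast; ring
  rw [hcast, PySem.List.pyGet?_natCast, PySem.List.pyGet?_natCast, condA_eq]


-- ===== VERDICT (by name: the statement is the Claim_ definition above) =====
theorem consecutiveLowerCase_spec : Claim_equal_consecutiveLowerCase := by
  intro password _
  unfold Spec_consecutiveLowerCase consecutiveLowerCase consecutiveLowerCase_alt
  simp only []
  rw [foldA_eq_natCount, natCount_eq_pairCount, pairCount_append_one,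
    countRuns_eq_pairCount]
  ring
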